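-- pv_equiv track=rewrite | github.com/hi-ogawa/practice | atcoder/abc263/c/main.py | iter_solve
-- ===== SOURCE A (Python) =====
-- from typing import Callable, Generator, List
--
-- def iter_solve(s: int, k: int) -> Generator[List[int], None, None]:
--     if s.bit_count() < k:
--         return
--
--     if k == 0:
--         yield []
--         return
--
--     for x in iter_bits(s):
--         for y in iter_solve(s & ~((1 << (x + 1)) - 1), k - 1):
--             yield [x, *y]
--
-- def iter_bits(x: int) -> Generator[int, None, None]:
--     while x:
--         yield ctz(x)
--         x = x & (x - 1)
--
-- def ctz(x: int) -> int:
--     return (x & -x).bit_length() - 1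
-- ===== SOURCE B (Python) =====
-- from typing import Generator, List
-- import itertools
--
-- def iter_solve(s: int, k: int) -> Generator[List[int], None, None]:
--     bits = [i for i in range(s.bit_length()) if s >> i & 1]
--     if k < 0 or k > len(bits):
--         return
--     for c in itertools.combinations(bits, k):
--         yield list(c)
-- ===== Notes on version B (the rewrite author's own statement) =====
-- stated objective: idiomatic
-- what changed: A's recursive generator that re-masks the bitmask and recurses per chosen bit is replaced by computing the ascending list of set-bit indices once and handing it to itertools.combinations (plus an explicit k < 0 guard), yielding the identical lists in the identical order.
-- outside the precondition, e.g. on iter_solve(-9, 3): A returns [], B returns [[0, 1, 2]]; on iter_solve(-4, 2): A returns [], B returns []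
import Mathlib
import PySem

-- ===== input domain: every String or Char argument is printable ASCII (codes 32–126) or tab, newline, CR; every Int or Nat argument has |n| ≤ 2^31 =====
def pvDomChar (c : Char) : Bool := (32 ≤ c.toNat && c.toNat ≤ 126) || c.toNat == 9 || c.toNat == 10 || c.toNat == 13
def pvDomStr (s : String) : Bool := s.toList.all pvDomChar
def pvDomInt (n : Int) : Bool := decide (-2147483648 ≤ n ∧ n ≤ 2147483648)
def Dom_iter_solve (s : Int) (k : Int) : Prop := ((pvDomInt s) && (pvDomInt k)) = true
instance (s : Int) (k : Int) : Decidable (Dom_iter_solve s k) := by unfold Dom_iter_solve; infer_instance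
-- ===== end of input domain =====

-- B replaces A's mask-and-recurse generator by an explicit ascending bit-index list fed to
-- itertools.combinations (an idiomatic, structurally different enumeration with identical order).

-- ===== PORT A =====

/-- Python `ctz(x) = (x & -x).bit_length() - 1`. -/
def pyCtz (x : Int) : Int := (PySem.Int.bitLength (PySem.Int.band x (-x)) : Int) - 1

theorem pv_band_pred_natAbs_lt (x : Int) (h : 0 < x) :
    (PySem.Int.band x (x - 1)).natAbs < x.natAbs := by
  rw [PySem.Int.band_of_nonneg (by omega) (by omega)]
  have h1 : x.toNat &&& (x - 1).toNat ≤ (x - 1).toNat := Nat.and_le_right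
  omega

/-- Python `iter_bits`: `while x: yield ctz(x); x = x & (x - 1)`.  The Python loop condition is
`x != 0`, but for `x < 0` it never terminates (unreachable under `Pre_iter_solve`); the `0 < x`
guard is the totality guard and agrees with `x != 0` on `x ≥ 0`. -/
def iterBits (x : Int) : List Int :=
  if h : 0 < x then pyCtz x :: iterBits (PySem.Int.band x (x - 1)) else []
termination_by x.natAbs
decreasing_by exact pv_band_pred_natAbs_lt x h

/-- Python `iter_solve`'s recursion, made total with fuel (the structure is unchanged; the fuel
`s.natAbs + 1` chosen in `iter_solve` bounds the depth on every input `Pre_iter_solve` admits).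
`(x + 1).toNat` is exact: `iter_bits` only yields `x ≥ 0`, and `1 << (x+1)` is `1 <<< (x+1).toNat`. -/
def iterSolveGo : Nat → Int → Int → List (List Int)
  | 0, _, _ => []
  | f + 1, s, k =>
    if (PySem.Int.bitCount s : Int) < k then []
    else if k = 0 then [[]]
    else
      (iterBits s).flatMap fun x =>
        (iterSolveGo f (PySem.Int.band s (Int.not ((1 <<< (x + 1).toNat) - 1))) (k - 1)).map
          fun y => x :: y

def iter_solve (s : Int) (k : Int) : List (List Int) := iterSolveGo (s.natAbs + 1) s k

-- ===== PORT B =====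

/-- `itertools.combinations` on a list, yielding lists, in itertools' order. -/
def comb : List Int → Nat → List (List Int)
  | _, 0 => [[]]
  | [], _ + 1 => []
  | x :: xs, n + 1 => ((comb xs n).map fun c => x :: c) ++ comb xs (n + 1)

/-- Port of B: collect the ascending bit indices, guard `k < 0 or k > len(bits)`, hand the
indices to combinations. -/
def iter_solve_alt (s : Int) (k : Int) : List (List Int) :=
  let bits := ((List.range (PySem.Int.bitLength s)).filter
      (fun (i : Nat) => PySem.Int.band (s >>> i) 1 != 0)).map (fun (i : Nat) => (i : Int))
  if k < 0 ∨ (bits.length : Int) < k then [] else comb bits k.toNat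

-- ===== PRECONDITION & SPEC =====

-- Pre_ excludes negative s with 0 < k ≤ bit_length(|s|): there A's iter_bits loops forever on
-- two's-complement negatives whenever k ≤ bit_count(|s|), and on the remaining thin band A's
-- popcount guard returns [] while B's bit scan of the signed value may not — an accidental
-- corner of the signed domain (s is a bitmask; the natural domain is s ≥ 0).
def Pre_iter_solve (s : Int) (k : Int) : Prop :=
  0 ≤ s ∨ k = 0 ∨ (PySem.Int.bitLength s : Int) < k
instance (s : Int) (k : Int) : Decidable (Pre_iter_solve s k) := by
  unfold Pre_iter_solve; infer_instance

def pvWitness_iter_solve : Int × Int := (5, 2)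

def Spec_iter_solve (s : Int) (k : Int) (out : List (List Int)) : Prop := out = iter_solve_alt s k
instance (s : Int) (k : Int) (out : List (List Int)) : Decidable (Spec_iter_solve s k out) := by
  unfold Spec_iter_solve; infer_instance

-- ===== CLAIM (what is proved, stated in full; the proofs are below) =====
def Claim_equal_iter_solve : Prop :=
  ∀ (s : Int) (k : Int), Dom_iter_solve s k → Pre_iter_solve s k →
    Spec_iter_solve s k (iter_solve s k)

-- ===== LEMMAS AND PROOFS =====

-- Abbreviations (proof-side only).
def pvLBL (m : Nat) : Nat := PySem.Int.bitLength (m : Int)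
def pvBCN (m : Nat) : Nat := PySem.Int.bitCount (m : Int)
def pvLowb (m : Nat) : Nat := m - (m &&& (m - 1))
def pvLB (m : Nat) : Nat := pvLBL (pvLowb m)
def pvMko (m j : Nat) : Nat := m - (m &&& (2 ^ j - 1))

theorem pv_tb_even (a : Nat) : (2 * a).testBit 0 = false := by
  rw [Nat.testBit_zero]; simp
theorem pv_tb_odd (a : Nat) : (2 * a + 1).testBit 0 = true := by
  rw [Nat.testBit_zero]; simp
theorem pv_tb_even_succ (a i : Nat) : (2 * a).testBit (i + 1) = a.testBit i := by
  rw [Nat.testBit_add_one]; congr 1; omega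
theorem pv_tb_odd_succ (a i : Nat) : (2 * a + 1).testBit (i + 1) = a.testBit i := by
  rw [Nat.testBit_add_one]; congr 1; omega

theorem pv_land_oe (a b : Nat) : (2 * a + 1) &&& (2 * b) = 2 * (a &&& b) := by
  apply Nat.eq_of_testBit_eq
  intro i
  rw [Nat.testBit_land]
  cases i with
  | zero => rw [pv_tb_odd, pv_tb_even, pv_tb_even]; simp
  | succ i => rw [pv_tb_odd_succ, pv_tb_even_succ, pv_tb_even_succ, ← Nat.testBit_land]

theorem pv_land_eo (a b : Nat) : (2 * a) &&& (2 * b + 1) = 2 * (a &&& b) := by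
  apply Nat.eq_of_testBit_eq
  intro i
  rw [Nat.testBit_land]
  cases i with
  | zero => rw [pv_tb_even, pv_tb_even]; simp
  | succ i => rw [pv_tb_even_succ, pv_tb_odd_succ, pv_tb_even_succ, ← Nat.testBit_land]

theorem pv_land_oo (a b : Nat) : (2 * a + 1) &&& (2 * b + 1) = 2 * (a &&& b) + 1 := by
  apply Nat.eq_of_testBit_eq
  intro i
  rw [Nat.testBit_land]
  cases i with
  | zero => rw [pv_tb_odd, pv_tb_odd, pv_tb_odd]; simp
  | succ i => rw [pv_tb_odd_succ, pv_tb_odd_succ, pv_tb_odd_succ, ← Nat.testBit_land]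

theorem pv_LBL_even (m : Nat) (h : 0 < m) : pvLBL (2 * m) = pvLBL m + 1 := by
  unfold pvLBL
  rw [PySem.Int.bitLength_natCast (by omega : 0 < 2 * m)]
  congr 2
  omega
theorem pv_LBL_odd (m : Nat) : pvLBL (2 * m + 1) = pvLBL m + 1 := by
  unfold pvLBL
  rw [PySem.Int.bitLength_natCast (by omega : 0 < 2 * m + 1)]
  congr 2
  omega
theorem pv_BCN_even (m : Nat) : pvBCN (2 * m) = pvBCN m := by
  rcases Nat.eq_zero_or_pos m with h | h
  · subst h; rfl
  · unfold pvBCN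
    rw [PySem.Int.bitCount_natCast (by omega : 0 < 2 * m)]
    have h1 : 2 * m % 2 = 0 := by omega
    have h2 : 2 * m / 2 = m := by omega
    rw [h1, h2]
    omega
theorem pv_BCN_odd (m : Nat) : pvBCN (2 * m + 1) = pvBCN m + 1 := by
  unfold pvBCN
  rw [PySem.Int.bitCount_natCast (by omega : 0 < 2 * m + 1)]
  have h1 : (2 * m + 1) % 2 = 1 := by omega
  have h2 : (2 * m + 1) / 2 = m := by omega
  rw [h1, h2]
  omega

theorem pv_lowb_odd (a : Nat) : pvLowb (2 * a + 1) = 1 := by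
  unfold pvLowb
  have : 2 * a + 1 - 1 = 2 * a := by omega
  rw [this, pv_land_oe, Nat.and_self]
  omega
theorem pv_lowb_even (b : Nat) (h : 0 < b) : pvLowb (2 * b) = 2 * pvLowb b := by
  unfold pvLowb
  have h1 : 2 * b - 1 = 2 * (b - 1) + 1 := by omega
  rw [h1, pv_land_eo]
  have h2 : b &&& (b - 1) ≤ b := Nat.and_le_left
  omega
theorem pv_lowb_pos (m : Nat) (h : 0 < m) : 0 < pvLowb m := by
  unfold pvLowb
  have h1 : m &&& (m - 1) ≤ m - 1 := Nat.and_le_right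
  omega
theorem pv_LBL_pos (m : Nat) (h : 0 < m) : 0 < pvLBL m := by
  unfold pvLBL
  rw [PySem.Int.bitLength_natCast h]
  omega
theorem pv_LB_odd (a : Nat) : pvLB (2 * a + 1) = 1 := by
  unfold pvLB
  rw [pv_lowb_odd]
  decide
theorem pv_LB_even (b : Nat) (h : 0 < b) : pvLB (2 * b) = pvLB b + 1 := by
  unfold pvLB
  rw [pv_lowb_even b h, pv_LBL_even _ (pv_lowb_pos b h)]
theorem pv_LB_pos (m : Nat) (h : 0 < m) : 0 < pvLB m := by
  exact pv_LBL_pos _ (pv_lowb_pos m h)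

theorem pv_mko_odd (a j : Nat) (h : 0 < j) : pvMko (2 * a + 1) j = 2 * pvMko a (j - 1) := by
  unfold pvMko
  have h1 : 2 ^ j - 1 = 2 * (2 ^ (j - 1) - 1) + 1 := by
    have : 2 ^ j = 2 * 2 ^ (j - 1) := by
      rw [← pow_succ']
      congr 1
      omega
    have h2 : 0 < 2 ^ (j - 1) := Nat.two_pow_pos _
    omega
  rw [h1, pv_land_oo]
  have h2 : a &&& (2 ^ (j - 1) - 1) ≤ a := Nat.and_le_left
  omega
theorem pv_mko_even (b j : Nat) (h : 0 < j) : pvMko (2 * b) j = 2 * pvMko b (j - 1) := by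
  unfold pvMko
  have h1 : 2 ^ j - 1 = 2 * (2 ^ (j - 1) - 1) + 1 := by
    have : 2 ^ j = 2 * 2 ^ (j - 1) := by
      rw [← pow_succ']
      congr 1
      omega
    have h2 : 0 < 2 ^ (j - 1) := Nat.two_pow_pos _
    omega
  rw [h1, pv_land_eo]
  have h2 : b &&& (2 ^ (j - 1) - 1) ≤ b := Nat.and_le_left
  omega

theorem pv_land_zero (a : Nat) : a &&& 0 = 0 := Nat.and_zero a

theorem pv_mko_LB : ∀ m : Nat, 0 < m → pvMko m (pvLB m) = m &&& (m - 1) := by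
  intro m
  induction m using Nat.strong_induction_on with
  | _ m IH =>
    intro hm
    rcases Nat.even_or_odd m with ⟨b, hb⟩ | ⟨a, ha⟩
    · -- m = 2 * b
      have hb' : m = 2 * b := by omega
      have hbpos : 0 < b := by omega
      subst hb'
      rw [pv_LB_even b hbpos, pv_mko_even b _ (by omega)]
      have h1 : pvLB b + 1 - 1 = pvLB b := by omega
      rw [h1, IH b (by omega) hbpos]
      have h2 : 2 * b - 1 = 2 * (b - 1) + 1 := by omega
      rw [h2, pv_land_eo]
    · -- m = 2 * a + 1
      have ha' : m = 2 * a + 1 := by omega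
      subst ha'
      rw [pv_LB_odd]
      unfold pvMko
      have h1 : (2 : Nat) ^ 1 - 1 = 2 * 0 + 1 := by norm_num
      rw [h1, pv_land_oo, pv_land_zero]
      have h2 : 2 * a + 1 - 1 = 2 * a := by omega
      rw [h2, pv_land_oe, Nat.and_self]

theorem pv_mko_tail : ∀ m : Nat, 0 < m → ∀ j, pvLB m ≤ j → pvMko m j = pvMko (m &&& (m - 1)) j := by
  intro m
  induction m using Nat.strong_induction_on with
  | _ m IH =>
    intro hm j hj
    rcases Nat.even_or_odd m with ⟨b, hb⟩ | ⟨a, ha⟩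
    · have hb' : m = 2 * b := by omega
      have hbpos : 0 < b := by omega
      subst hb'
      have hj1 : 0 < j := by
        have := pv_LB_pos (2 * b) (by omega)
        omega
      have h2 : 2 * b - 1 = 2 * (b - 1) + 1 := by omega
      rw [h2, pv_land_eo, pv_mko_even b j hj1, pv_mko_even _ j hj1]
      rw [pv_LB_even b hbpos] at hj
      rw [IH b (by omega) hbpos (j - 1) (by omega)]
    · have ha' : m = 2 * a + 1 := by omega
      subst ha'
      have hj1 : 0 < j := by
        rw [pv_LB_odd] at hj
        omega
      have h2 : 2 * a + 1 - 1 = 2 * a := by omega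
      rw [h2, pv_land_oe, Nat.and_self, pv_mko_odd a j hj1, pv_mko_even a j hj1]

theorem pv_LB_mono : ∀ m : Nat, 0 < m → 0 < m &&& (m - 1) → pvLB m ≤ pvLB (m &&& (m - 1)) := by
  intro m
  induction m using Nat.strong_induction_on with
  | _ m IH =>
    intro hm h2
    rcases Nat.even_or_odd m with ⟨b, hb⟩ | ⟨a, ha⟩
    · have hb' : m = 2 * b := by omega
      have hbpos : 0 < b := by omega
      subst hb'
      have h3 : 2 * b - 1 = 2 * (b - 1) + 1 := by omega
      rw [h3, pv_land_eo] at h2 ⊢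
      rw [pv_LB_even b hbpos, pv_LB_even _ (by omega)]
      have := IH b (by omega) hbpos (by omega)
      omega
    · have ha' : m = 2 * a + 1 := by omega
      subst ha'
      have h3 : 2 * a + 1 - 1 = 2 * a := by omega
      rw [h3, pv_land_oe, Nat.and_self] at h2 ⊢
      rw [pv_LB_odd]
      exact pv_LB_pos _ h2

-- ---- Int/Nat bridges ----
theorem pv_not_natCast (n : Nat) : Int.not (n : Int) = -(n : Int) - 1 := by
  show Int.not (Int.ofNat n) = _
  simp only [Int.not]
  omega

theorem pv_band_neg (m : Nat) (h : 0 < m) :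
    PySem.Int.band (m : Int) (-(m : Int)) = (((m - (m &&& (m - 1)) : Nat)) : Int) := by
  have h1 : ¬ (0 : Int) ≤ -(m : Int) := by omega
  simp only [PySem.Int.band, h1, if_false, Int.toNat_natCast]
  rw [if_pos (by omega : (0:Int) ≤ (m:Int))]
  have h2 : (-(-((m:Int))) - 1).toNat = m - 1 := by omega
  rw [h2]

theorem pv_band_not (m n : Nat) :
    PySem.Int.band (m : Int) (Int.not (n : Int)) = ((m - (m &&& n) : Nat) : Int) := by
  have hn := pv_not_natCast n
  have h1 : ¬ (0 : Int) ≤ Int.not (n : Int) := by omega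
  simp only [PySem.Int.band, h1, if_false, Int.toNat_natCast]
  rw [if_pos (by omega : (0:Int) ≤ (m:Int))]
  have h2 : (-(Int.not (n:Int)) - 1).toNat = n := by omega
  rw [h2]

theorem pv_band_natCast' (m : Nat) (h : 0 < m) :
    PySem.Int.band (m : Int) ((m : Int) - 1) = ((m &&& (m - 1) : Nat) : Int) := by
  have h1 : ((m : Int) - 1) = ((m - 1 : Nat) : Int) := by omega
  rw [h1, PySem.Int.band_natCast]

theorem pv_band_neg' (m : Nat) (h : 0 < m) :
    PySem.Int.band (m : Int) (-(m : Int)) = ((pvLowb m : Nat) : Int) := by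
  rw [pv_band_neg m h]; rfl
theorem pv_pyCtz_natCast (m : Nat) (h : 0 < m) : pyCtz (m : Int) = (pvLB m : Int) - 1 := by
  unfold pyCtz
  rw [pv_band_neg' m h]
  rfl

-- ---- iterBits characterisation ----
theorem pv_iterBits_pos (m : Nat) (h : 0 < m) :
    iterBits (m : Int) = ((pvLB m : Int) - 1) :: iterBits ((m &&& (m - 1) : Nat) : Int) := by
  rw [iterBits]
  rw [dif_pos (by exact_mod_cast h : (0 : Int) < (m : Int))]
  rw [pv_pyCtz_natCast m h, pv_band_natCast' m h]
theorem pv_iterBits_nonpos (x : Int) (h : ¬ 0 < x) : iterBits x = [] := by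
  rw [iterBits, dif_neg h]
theorem pv_iterBits_double (a : Nat) :
    iterBits ((2 * a : Nat) : Int) = (iterBits (a : Int)).map (· + 1) := by
  induction a using Nat.strong_induction_on with
  | _ a IH =>
    rcases Nat.eq_zero_or_pos a with h | h
    · subst h
      simp [pv_iterBits_nonpos]
    · have h2a : 0 < 2 * a := by omega
      rw [pv_iterBits_pos (2 * a) h2a, pv_iterBits_pos a h]
      have hland : 2 * a - 1 = 2 * (a - 1) + 1 := by omega
      have hl : (2 * a) &&& (2 * a - 1) = 2 * (a &&& (a - 1)) := by
        rw [hland, pv_land_eo]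
      rw [hl, List.map_cons]
      have hstep := IH (a &&& (a - 1)) (by
        have := Nat.and_le_right (n := a) (m := a - 1)
        omega)
      rw [hstep, pv_LB_even a h]
      congr 1
      push_cast
      ring
theorem pv_iterBits_spec (m : Nat) :
    iterBits (m : Int)
      = ((List.range (pvLBL m)).filter (fun i => m.testBit i)).map (fun (i : Nat) => (i : Int)) := by
  induction m using Nat.strong_induction_on with
  | _ m IH =>
    rcases Nat.eq_zero_or_pos m with h | h
    · subst h
      have e0 : pvLBL 0 = 0 := by decide
      rw [e0]
      simp [pv_iterBits_nonpos]
    · rcases Nat.even_or_odd m with ⟨b, hb⟩ | ⟨a, ha⟩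
      · have hb' : m = 2 * b := by omega
        have hbpos : 0 < b := by omega
        subst hb'
        have hfilter : (List.range (pvLBL (2 * b))).filter (fun i => (2 * b).testBit i)
            = ((List.range (pvLBL b)).filter (fun i => b.testBit i)).map Nat.succ := by
          rw [pv_LBL_even b hbpos, List.range_succ_eq_map, List.filter_cons, pv_tb_even b]
          simp only [Bool.false_eq_true, if_false, List.filter_map]
          congr 1
          apply List.filter_congr
          intro i _
          simpa [Function.comp] using pv_tb_even_succ b i
        rw [hfilter, pv_iterBits_double b, IH b (by omega), List.map_map, List.map_map]
        apply List.map_congr_left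
        intro i _
        simp [Function.comp]
      · have ha' : m = 2 * a + 1 := by omega
        subst ha'
        have hfilter : (List.range (pvLBL (2 * a + 1))).filter (fun i => (2 * a + 1).testBit i)
            = 0 :: ((List.range (pvLBL a)).filter (fun i => a.testBit i)).map Nat.succ := by
          rw [pv_LBL_odd, List.range_succ_eq_map, List.filter_cons, pv_tb_odd]
          simp only [if_true, List.filter_map]
          congr 1
          apply congrArg
          apply List.filter_congr
          intro i _
          simpa [Function.comp] using pv_tb_odd_succ a i
        have hland : (2 * a + 1) &&& (2 * a + 1 - 1) = 2 * a := by
          have h1 : 2 * a + 1 - 1 = 2 * a := by omega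
          rw [h1, pv_land_oe, Nat.and_self]
        rw [hfilter, pv_iterBits_pos (2 * a + 1) (by omega), pv_LB_odd, hland,
            pv_iterBits_double a, IH a (by omega), List.map_cons, List.map_map, List.map_map]
        congr 1

theorem pv_filter_len : ∀ m : Nat,
    ((List.range (pvLBL m)).filter (fun i => m.testBit i)).length = pvBCN m := by
  intro m
  induction m using Nat.strong_induction_on with
  | _ m IH =>
    rcases Nat.eq_zero_or_pos m with h | h
    · subst h
      have e0 : pvLBL 0 = 0 := by decide
      have e1 : pvBCN 0 = 0 := by decide
      rw [e0, e1]
      rfl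
    · rcases Nat.even_or_odd m with ⟨b, hb⟩ | ⟨a, ha⟩
      · have hb' : m = 2 * b := by omega
        have hbpos : 0 < b := by omega
        subst hb'
        have hfilter : (List.range (pvLBL (2 * b))).filter (fun i => (2 * b).testBit i)
            = ((List.range (pvLBL b)).filter (fun i => b.testBit i)).map Nat.succ := by
          rw [pv_LBL_even b hbpos, List.range_succ_eq_map, List.filter_cons, pv_tb_even b]
          simp only [Bool.false_eq_true, if_false, List.filter_map]
          congr 1
          apply List.filter_congr
          intro i _
          simpa [Function.comp] using pv_tb_even_succ b i
        rw [hfilter, List.length_map, IH b (by omega), pv_BCN_even]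
      · have ha' : m = 2 * a + 1 := by omega
        subst ha'
        have hfilter : (List.range (pvLBL (2 * a + 1))).filter (fun i => (2 * a + 1).testBit i)
            = 0 :: ((List.range (pvLBL a)).filter (fun i => a.testBit i)).map Nat.succ := by
          rw [pv_LBL_odd, List.range_succ_eq_map, List.filter_cons, pv_tb_odd]
          simp only [if_true, List.filter_map]
          congr 1
          apply congrArg
          apply List.filter_congr
          intro i _
          simpa [Function.comp] using pv_tb_odd_succ a i
        rw [hfilter, List.length_cons, List.length_map, IH a (by omega), pv_BCN_odd]

theorem pv_iterBits_len (m : Nat) : (iterBits (m : Int)).length = pvBCN m := by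
  rw [pv_iterBits_spec, List.length_map, pv_filter_len]
theorem pv_iterBits_mem (m : Nat) (x : Int) (hx : x ∈ iterBits (m : Int)) :
    ∃ i : Nat, x = (i : Int) ∧ m.testBit i = true := by
  rw [pv_iterBits_spec] at hx
  obtain ⟨i, hi, rfl⟩ := List.mem_map.mp hx
  exact ⟨i, rfl, (List.mem_filter.mp hi).2⟩
theorem pv_iterBits_ge : ∀ m : Nat, 0 < m →
    ∀ x ∈ iterBits (m : Int), (pvLB m : Int) - 1 ≤ x := by
  intro m
  induction m using Nat.strong_induction_on with
  | _ m IH =>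
    intro h x hx
    rw [pv_iterBits_pos m h] at hx
    rcases List.mem_cons.mp hx with rfl | hx'
    · omega
    · rcases Nat.eq_zero_or_pos (m &&& (m - 1)) with h2 | h2
      · rw [h2, pv_iterBits_nonpos ((0 : Nat) : Int) (by norm_num)] at hx'
        cases hx'
      · have hland : m &&& (m - 1) < m := by
          have := Nat.and_le_right (n := m) (m := m - 1)
          omega
        have h3 := IH (m &&& (m - 1)) hland h2 x hx'
        have h4 := pv_LB_mono m h h2
        omega

-- ---- comb lemmas ----
theorem pv_comb_zero (l : List Int) : comb l 0 = [[]] := by cases l <;> rfl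

theorem pv_comb_nil : ∀ (l : List Int) (n : Nat), l.length < n → comb l n = [] := by
  intro l
  induction l with
  | nil =>
    intro n h
    match n, h with
    | n + 1, _ => rfl
  | cons x xs IH =>
    intro n h
    match n, h with
    | n + 1, h =>
      show (comb xs n).map (fun c => x :: c) ++ comb xs (n + 1) = []
      rw [IH n (by simpa using Nat.lt_of_succ_lt_succ h), IH (n + 1) (by simp at h ⊢; omega)]
      rfl

-- the mask argument A passes, as a function of the yielded bit x
def pvMaskI (s x : Int) : Int := PySem.Int.band s (Int.not ((1 <<< (x + 1).toNat) - 1))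

theorem pv_maskI_natCast (m i : Nat) :
    pvMaskI (m : Int) (i : Int) = ((pvMko m (i + 1) : Nat) : Int) := by
  unfold pvMaskI
  have h1 : ((i : Int) + 1).toNat = i + 1 := by omega
  have h2 : ((1 <<< (i + 1) : Nat) : Int) = (((2 ^ (i + 1) : Nat)) : Int) := by
    rw [Nat.one_shiftLeft]
  have h3 : (((2 ^ (i + 1) : Nat)) : Int) - 1 = (((2 ^ (i + 1) - 1 : Nat)) : Int) := by
    have : 0 < 2 ^ (i + 1) := Nat.two_pow_pos _
    omega
  rw [h1, h2, h3, pv_band_not]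
  rfl

theorem pv_flatMap_congr (l : List Int) (F G : Int → List (List Int))
    (h : ∀ x ∈ l, F x = G x) : l.flatMap F = l.flatMap G := by
  induction l with
  | nil => rfl
  | cons x xs IH =>
    rw [List.flatMap_cons, List.flatMap_cons, h x (List.mem_cons_self),
        IH (fun y hy => h y (List.mem_cons_of_mem x hy))]

theorem pv_comb_char : ∀ m : Nat, ∀ n : Nat,
    ((iterBits (m : Int)).flatMap fun x =>
        (comb (iterBits (pvMaskI (m : Int) x)) n).map fun y => x :: y)
      = comb (iterBits (m : Int)) (n + 1) := by
  intro m
  induction m using Nat.strong_induction_on with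
  | _ m IH =>
    intro n
    rcases Nat.eq_zero_or_pos m with h | h
    · subst h
      rw [pv_iterBits_nonpos ((0 : Nat) : Int) (by norm_num)]
      rfl
    · rw [pv_iterBits_pos m h, List.flatMap_cons]
      have hLB : 0 < pvLB m := pv_LB_pos m h
      have hx0 : ((pvLB m : Int) - 1) = ((pvLB m - 1 : Nat) : Int) := by omega
      have hkey1 : pvMaskI (m : Int) ((pvLB m : Int) - 1) = ((m &&& (m - 1) : Nat) : Int) := by
        rw [hx0, pv_maskI_natCast m (pvLB m - 1)]
        have : pvLB m - 1 + 1 = pvLB m := by omega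
        rw [this, pv_mko_LB m h]
      rw [hkey1]
      have hland : m &&& (m - 1) < m := by
        have := Nat.and_le_right (n := m) (m := m - 1)
        omega
      have htail : ((iterBits ((m &&& (m - 1) : Nat) : Int)).flatMap fun x =>
          (comb (iterBits (pvMaskI (m : Int) x)) n).map fun y => x :: y)
          = comb (iterBits ((m &&& (m - 1) : Nat) : Int)) (n + 1) := by
        rcases Nat.eq_zero_or_pos (m &&& (m - 1)) with h2 | h2
        · rw [h2, pv_iterBits_nonpos ((0 : Nat) : Int) (by norm_num)]
          rfl
        · have hcong : ∀ x ∈ iterBits ((m &&& (m - 1) : Nat) : Int),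
              pvMaskI (m : Int) x = pvMaskI ((m &&& (m - 1) : Nat) : Int) x := by
            intro x hx
            obtain ⟨i, rfl, htb⟩ := pv_iterBits_mem _ x hx
            have hge := pv_iterBits_ge _ h2 _ hx
            have hmono := pv_LB_mono m h h2
            have hj : pvLB m ≤ i + 1 := by omega
            rw [pv_maskI_natCast m i, pv_maskI_natCast _ i, pv_mko_tail m h (i + 1) hj]
          rw [pv_flatMap_congr _ _ _ (fun x hx => by rw [hcong x hx]), IH _ hland n]
      rw [htail]
      rfl

-- ---- main fuel lemma ----
theorem pv_maskI_raw (s x : Int) :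
    PySem.Int.band s (Int.not ((1 <<< (x + 1).toNat) - 1)) = pvMaskI s x := rfl

theorem pv_mko_lt (m i : Nat) (htb : m.testBit i = true) : pvMko m (i + 1) < m := by
  unfold pvMko
  have hle : m &&& (2 ^ (i + 1) - 1) ≤ m := Nat.and_le_left
  have hpos : 0 < m &&& (2 ^ (i + 1) - 1) := by
    by_contra hc
    have h0 : m &&& (2 ^ (i + 1) - 1) = 0 := by omega
    have := Nat.testBit_land m (2 ^ (i + 1) - 1) i
    rw [h0, Nat.zero_testBit, htb, Nat.testBit_two_pow_sub_one] at this
    simp at this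
  omega

theorem pv_go_spec : ∀ (f : Nat) (s k : Int), 0 ≤ s → s.natAbs < f →
      iterSolveGo f s k = if k < 0 then [] else comb (iterBits s) k.toNat := by
  intro f
  induction f with
  | zero => intro s k hs hf; omega
  | succ f IH =>
    intro s k hs hf
    lift s to Nat using hs with m
    rw [Int.natAbs_natCast] at hf
    have hbc : (0 : Int) ≤ (PySem.Int.bitCount (m : Int) : Int) := by positivity
    show (if (PySem.Int.bitCount (m : Int) : Int) < k then [] else if k = 0 then [[]]
        else (iterBits (m : Int)).flatMap fun x =>
          (iterSolveGo f (PySem.Int.band (m : Int) (Int.not ((1 <<< (x + 1).toNat) - 1))) (k - 1)).map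
            fun y => x :: y) = _
    by_cases hk0 : k < 0
    · rw [if_pos hk0, if_neg (by omega), if_neg (by omega)]
      apply List.flatMap_eq_nil_iff.mpr
      intro x hx
      obtain ⟨i, rfl, htb⟩ := pv_iterBits_mem m x hx
      rw [pv_maskI_raw, pv_maskI_natCast m i]
      have hlt := pv_mko_lt m i htb
      rw [IH _ (k - 1) (by positivity) (by rw [Int.natAbs_natCast]; omega),
          if_pos (by omega : k - 1 < 0)]
      rfl
    · rw [if_neg hk0]
      by_cases hguard : (PySem.Int.bitCount (m : Int) : Int) < k
      · rw [if_pos hguard]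
        refine (pv_comb_nil _ _ ?_).symm
        rw [pv_iterBits_len m]
        have : pvBCN m = PySem.Int.bitCount (m : Int) := rfl
        omega
      · rw [if_neg hguard]
        by_cases hk : k = 0
        · subst hk
          simp [comb]
        · rw [if_neg hk]
          have hrw : ∀ x ∈ iterBits (m : Int),
              ((iterSolveGo f (PySem.Int.band (m : Int)
                  (Int.not ((1 <<< (x + 1).toNat) - 1))) (k - 1)).map fun y => x :: y)
              = ((comb (iterBits (pvMaskI (m : Int) x)) (k - 1).toNat).map fun y => x :: y) := by
            intro x hx
            obtain ⟨i, rfl, htb⟩ := pv_iterBits_mem m x hx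
            rw [pv_maskI_raw, pv_maskI_natCast m i]
            have hlt := pv_mko_lt m i htb
            rw [IH _ (k - 1) (by positivity) (by rw [Int.natAbs_natCast]; omega),
                if_neg (by omega : ¬ k - 1 < 0)]
          rw [pv_flatMap_congr _ _ _ hrw, pv_comb_char m ((k - 1).toNat)]
          congr 1
          omega

theorem pv_bits_eq (m : Nat) :
    ((List.range (PySem.Int.bitLength ((m : Int)))).filter
        (fun (i : Nat) => PySem.Int.band ((m : Int) >>> i) 1 != 0)).map (fun (i : Nat) => (i : Int))
      = iterBits (m : Int) := by
  rw [pv_iterBits_spec]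
  congr 1
  apply List.filter_congr
  intro i _
  have h1 : ((m : Int) >>> i) = ((m >>> i : Nat) : Int) := by
    simp [Int.shiftRight_eq]
  have h2 : PySem.Int.band ((m >>> i : Nat) : Int) 1 = (((m >>> i) &&& 1 : Nat) : Int) := by
    have h3 := PySem.Int.band_natCast (m >>> i) 1
    simpa using h3
  rw [h1, h2]
  have hA : ((m >>> i) &&& 1) = (m >>> i) % 2 := Nat.and_one_is_mod _
  have hB : m.testBit i = decide ((m >>> i) % 2 = 1) := by
    simp [Nat.testBit, Nat.land_comm, Nat.and_one_is_mod]
  rw [hA, hB]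
  rcases Nat.mod_two_eq_zero_or_one (m >>> i) with hb | hb <;> rw [hb] <;> simp

-- ===== VERDICT (by name: the statement is the Claim_ definition above) =====
theorem iter_solve_spec : Claim_equal_iter_solve := by
  intro s k _ hpre
  unfold Spec_iter_solve iter_solve iter_solve_alt
  by_cases hs : 0 ≤ s
  · lift s to Nat using hs with m
    rw [Int.natAbs_natCast,
        pv_go_spec (m + 1) _ k (by positivity) (by rw [Int.natAbs_natCast]; omega)]
    simp only [pv_bits_eq]
    by_cases hneg : k < 0
    · rw [if_pos hneg, if_pos (Or.inl hneg)]
    · rw [if_neg hneg]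
      by_cases hbig : (((iterBits (m : Int)).length : Int) < k)
      · rw [if_pos (Or.inr hbig), pv_comb_nil _ _ (by omega)]
      · rw [if_neg (by tauto)]
  · replace hs : s < 0 := by omega
    have hbl0 : (0 : Int) ≤ (PySem.Int.bitLength s : Int) := by positivity
    have hbc : (0 : Int) ≤ (PySem.Int.bitCount s : Int) := by positivity
    have hlen : (((List.range (PySem.Int.bitLength s)).filter
        (fun (i : Nat) => PySem.Int.band (s >>> i) 1 != 0)).map (fun (i : Nat) => (i : Int))).length
        ≤ PySem.Int.bitLength s := by
      have hfl := List.length_filter_le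
        (fun (i : Nat) => PySem.Int.band (s >>> i) 1 != 0) (List.range (PySem.Int.bitLength s))
      rw [List.length_map]
      rw [List.length_range] at hfl
      exact hfl
    rcases hpre with h0 | hk0 | hbl
    · omega
    · subst hk0
      simp only [iterSolveGo]
      norm_num
      rw [if_neg (by omega : ¬ (PySem.Int.bitCount s : Int) < 0),
          if_neg (by omega), pv_comb_zero]
    · have hle : (PySem.Int.bitCount s : Int) ≤ (PySem.Int.bitLength s : Int) := by
        exact_mod_cast PySem.Int.bitCount_le_bitLength s
      simp only [iterSolveGo]
      rw [if_pos (by omega), if_pos (by right; omega)]
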